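-- pv_equiv track=rewrite | github.com/shubhamshanker/NQ_Backtest | scripts/refactor_data_paths.py | _add_import_if_needed
-- ===== SOURCE A (Python) =====
-- def _add_import_if_needed(content: str) -> str:
--     """Add import for get_data_path if not already present."""
--     # Check if import already exists
--     if 'from config.data_config import' in content or 'get_data_path' in content:
--         return content
--
--     # Find the best place to add import
--     lines = content.split('\n')
--     import_line = "from config.data_config import get_data_path"
--
--     # Find last import line
--     last_import_idx = -1
--     for i, line in enumerate(lines):
--         if line.strip().startswith(('import ', 'from ')) and not line.strip().startswith('#'):
--             last_import_idx = i
--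
--     if last_import_idx >= 0:
--         # Insert after last import
--         lines.insert(last_import_idx + 1, import_line)
--     else:
--         # Insert at beginning after docstring/comments
--         insert_idx = 0
--         for i, line in enumerate(lines):
--             if line.strip() and not line.strip().startswith(('#', '"""', "'''")):
--                 insert_idx = i
--                 break
--         lines.insert(insert_idx, import_line)
--         lines.insert(insert_idx + 1, "")  # Add blank line
--
--     return '\n'.join(lines)
-- ===== SOURCE B (Python) =====
-- IMPORT_LINE = "from config.data_config import get_data_path"
--
--
-- def _not_import(line):
--     s = line.strip()
--     return not (s.startswith('import ') or s.startswith('from '))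
--
--
-- def _not_code(line):
--     s = line.strip()
--     return (not s) or s.startswith(('#', '"""', "'''"))
--
--
-- def _add_import_if_needed(content: str) -> str:
--     """Add import for get_data_path if not already present."""
--     if 'from config.data_config import' in content or 'get_data_path' in content:
--         return content
--     lines = content.split('\n')
--     # peel trailing non-import lines off the end; what remains ends at the last import
--     head = list(lines)
--     tail = []
--     while head and _not_import(head[-1]):
--         tail.append(head.pop())
--     tail.reverse()
--     if head:
--         return '\n'.join(head + [IMPORT_LINE] + tail)
--     # no import anywhere: peel the leading comment/docstring/blank block off the front
--     pre, rest = [], list(lines)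
--     while rest and _not_code(rest[0]):
--         pre.append(rest.pop(0))
--     if rest:
--         return '\n'.join(pre + [IMPORT_LINE, ""] + rest)
--     return '\n'.join([IMPORT_LINE, ""] + lines)
-- ===== Notes on version B (the rewrite author's own statement) =====
-- stated objective: alternative
-- what changed: B never tracks indices or calls insert: it peels trailing non-import lines off the end into a tail (pop loop), or peels the leading comment/blank block off the front, and rejoins the three segments around the import line; A instead enumerates all lines to keep a last-import index and splices with list.insert.
import Mathlib
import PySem

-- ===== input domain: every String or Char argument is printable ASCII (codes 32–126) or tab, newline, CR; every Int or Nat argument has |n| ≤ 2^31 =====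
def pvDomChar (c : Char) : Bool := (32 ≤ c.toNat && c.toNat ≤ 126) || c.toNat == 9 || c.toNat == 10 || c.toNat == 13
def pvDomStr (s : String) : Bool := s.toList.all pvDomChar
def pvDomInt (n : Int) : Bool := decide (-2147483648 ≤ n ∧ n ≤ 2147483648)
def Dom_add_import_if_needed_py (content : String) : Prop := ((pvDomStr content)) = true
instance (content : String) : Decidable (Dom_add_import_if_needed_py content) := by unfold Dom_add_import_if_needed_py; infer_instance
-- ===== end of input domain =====

-- B is index-free: it peels trailing non-import lines (or the leading comment block) into
-- segments and rejoins them around the import line, instead of A's index-tracking enumerate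
-- folds and list.insert calls (objective: alternative).

-- ===== PORT A =====
def pvImportLine : String := "from config.data_config import get_data_path"

-- A's per-line test in the last-import loop
def pvAIsImport (line : String) : Bool :=
  (PySem.Str.startswith (PySem.Str.strip line) "import " ||
   PySem.Str.startswith (PySem.Str.strip line) "from ") &&
  !(PySem.Str.startswith (PySem.Str.strip line) "#")

-- A's per-line test in the insert-position loop
def pvAIsCode (line : String) : Bool :=
  (PySem.Str.len (PySem.Str.strip line) != 0) &&
  !(PySem.Str.startswith (PySem.Str.strip line) "#" ||
    PySem.Str.startswith (PySem.Str.strip line) "\"\"\"" ||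
    PySem.Str.startswith (PySem.Str.strip line) "'''")

-- A's 'for i, line in enumerate(lines): if …: insert_idx = i; break' (insert_idx starts at 0)
def pvAFirstCode : Int → List String → Int
  | _, [] => 0
  | i, l :: ls => if pvAIsCode l then i else pvAFirstCode (i + 1) ls

def add_import_if_needed_py (content : String) : String :=
  if PySem.Str.isIn "from config.data_config import" content ||
     PySem.Str.isIn "get_data_path" content then
    content
  else
    let lines := (PySem.Str.split? content "\n").getD []  -- sep "\n" ≠ "": split? is some here
    let lastImportIdx : Int :=
      (PySem.List.enumerate lines).foldl
        (fun acc il => if pvAIsImport il.2 then il.1 else acc) (-1)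
    if 0 ≤ lastImportIdx then
      PySem.Str.join "\n" (PySem.List.insert lines (lastImportIdx + 1) pvImportLine)
    else
      let insertIdx := pvAFirstCode 0 lines
      PySem.Str.join "\n"
        (PySem.List.insert (PySem.List.insert lines insertIdx pvImportLine) (insertIdx + 1) "")

-- ===== PORT B =====
-- B's _not_import
def pvNotImport (line : String) : Bool :=
  !(PySem.Str.startswith (PySem.Str.strip line) "import " ||
    PySem.Str.startswith (PySem.Str.strip line) "from ")

-- B's _not_code
def pvNotCode (line : String) : Bool :=
  (PySem.Str.len (PySem.Str.strip line) == 0) ||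
  (PySem.Str.startswith (PySem.Str.strip line) "#" ||
   PySem.Str.startswith (PySem.Str.strip line) "\"\"\"" ||
   PySem.Str.startswith (PySem.Str.strip line) "'''")

-- B's 'while head and _not_import(head[-1]): tail.append(head.pop())'
def pvPopLoop (head tail : List String) : List String × List String :=
  match h : head.getLast? with
  | some x =>
    if pvNotImport x then pvPopLoop head.dropLast (tail ++ [x]) else (head, tail)
  | none => (head, tail)
termination_by head.length
decreasing_by
  cases head with
  | nil => simp at h
  | cons a l => simp [List.length_dropLast]

-- B's 'while rest and _not_code(rest[0]): pre.append(rest.pop(0))'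
def pvTakeLoop (pre rest : List String) : List String × List String :=
  match rest with
  | [] => (pre, [])
  | r :: rs => if pvNotCode r then pvTakeLoop (pre ++ [r]) rs else (pre, r :: rs)

def add_import_if_needed_py_alt (content : String) : String :=
  if PySem.Str.isIn "from config.data_config import" content ||
     PySem.Str.isIn "get_data_path" content then
    content
  else
    let lines := (PySem.Str.split? content "\n").getD []  -- sep "\n" ≠ "": split? is some here
    let ht := pvPopLoop lines []
    let head := ht.1
    let tail := ht.2.reverse
    if head ≠ [] then
      PySem.Str.join "\n" (head ++ [pvImportLine] ++ tail)
    else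
      let pr := pvTakeLoop [] lines
      if pr.2 ≠ [] then
        PySem.Str.join "\n" (pr.1 ++ [pvImportLine, ""] ++ pr.2)
      else
        PySem.Str.join "\n" ([pvImportLine, ""] ++ lines)

-- ===== PRECONDITION & SPEC =====
def Spec_add_import_if_needed_py (content : String) (out : String) : Prop := out = add_import_if_needed_py_alt content
instance (content : String) (out : String) : Decidable (Spec_add_import_if_needed_py content out) := by unfold Spec_add_import_if_needed_py; infer_instance

-- ===== CLAIM (what is proved, stated in full; the proofs are below) =====
def Claim_equal_add_import_if_needed_py : Prop := ∀ (content : String), Dom_add_import_if_needed_py content → Spec_add_import_if_needed_py content (add_import_if_needed_py content)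

-- ===== LEMMAS AND PROOFS =====

-- B's import test is the negation of A's (with A's redundant '#' clause removed)
def pvBIsImport (line : String) : Bool := !(pvNotImport line)

lemma pvNotCode_eq (line : String) : pvNotCode line = !(pvAIsCode line) := by
  unfold pvNotCode pvAIsCode
  simp only [bne, Bool.not_and, Bool.not_not]

-- findIdx? points inside the list
lemma pvFindIdxLt {α : Type} (p : α → Bool) (l : List α) (j : Nat)
    (h : List.findIdx? p l = some j) : j < l.length := by
  induction l generalizing j with
  | nil => simp [List.findIdx?_nil] at h
  | cons x xs ih =>
    rw [List.findIdx?_cons] at h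
    split at h
    · simp at h; simp [← h]
    · cases hj : List.findIdx? p xs with
      | none => rw [hj] at h; simp at h
      | some k => rw [hj] at h; simp at h; have := ih k hj; simp; omega

-- findIdx? = none ↔ the negated-predicate dropWhile drops everything
lemma pvFind_none {α : Type} (p : α → Bool) (l : List α)
    (h : List.findIdx? p l = none) : l.dropWhile (fun x => !p x) = [] := by
  induction l with
  | nil => simp
  | cons x xs ih =>
    rw [List.findIdx?_cons] at h
    split at h
    · simp at h
    · rename_i hx
      rw [Bool.not_eq_true] at hx
      cases hj : List.findIdx? p xs with
      | some k => rw [hj] at h; simp at h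
      | none => simp [hx, ih hj]

-- findIdx? = some j splits take/dropWhile of the negated predicate at j
lemma pvFind_some {α : Type} (p : α → Bool) (l : List α) (j : Nat)
    (h : List.findIdx? p l = some j) :
    l.takeWhile (fun x => !p x) = l.take j ∧ l.dropWhile (fun x => !p x) = l.drop j := by
  induction l generalizing j with
  | nil => simp [List.findIdx?_nil] at h
  | cons x xs ih =>
    rw [List.findIdx?_cons] at h
    split at h
    · rename_i hx
      simp at h
      subst h
      simp [hx]
    · rename_i hx
      simp at hx
      cases hj : List.findIdx? p xs with
      | none => rw [hj] at h; simp at h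
      | some k =>
        rw [hj] at h; simp at h
        obtain ⟨h1, h2⟩ := ih k hj
        subst h
        simp [hx, h1, h2]

-- the pop loop peels exactly the maximal trailing non-import block
lemma pvPopLoop_eq (l t : List String) :
    pvPopLoop l t =
      ((l.reverse.dropWhile pvNotImport).reverse, t ++ l.reverse.takeWhile pvNotImport) := by
  induction l using List.reverseRecOn generalizing t with
  | nil => rw [pvPopLoop]; simp
  | append_singleton ys y ih =>
    rw [pvPopLoop]
    split
    · rename_i x hx
      rw [List.getLast?_concat] at hx
      injection hx with hxy
      subst hxy
      rw [List.dropLast_concat]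
      by_cases hy : pvNotImport y = true
      · rw [if_pos hy, ih]
        simp [List.reverse_append, List.dropWhile_cons, List.takeWhile_cons, hy]
      · rw [Bool.not_eq_true] at hy
        rw [if_neg (by simp [hy])]
        simp [List.reverse_append, List.dropWhile_cons, List.takeWhile_cons, hy]
    · rename_i hx
      rw [List.getLast?_concat] at hx
      simp at hx

-- the front loop peels exactly the maximal leading non-code block
lemma pvTakeLoop_eq (pre rest : List String) :
    pvTakeLoop pre rest = (pre ++ rest.takeWhile pvNotCode, rest.dropWhile pvNotCode) := by
  induction rest generalizing pre with
  | nil => simp [pvTakeLoop]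
  | cons r rs ih =>
    rw [pvTakeLoop, List.takeWhile_cons, List.dropWhile_cons]
    by_cases hr : pvNotCode r = true
    · simp [hr, ih]
    · rw [Bool.not_eq_true] at hr
      simp [hr]

-- if s starts with a nonempty p not itself starting with '#', s does not start with '#'
lemma pvNoHash (s p : String) (hp : PySem.Str.startswith s p = true)
    (hph : PySem.Str.startswith p "#" = false) (hne : p.toList ≠ []) :
    PySem.Str.startswith s "#" = false := by
  rw [Bool.eq_false_iff]
  intro hh
  rw [PySem.Str.startswith_eq, PySem.Chars.startswith_iff] at hp hh
  have h3 : ("#".toList) <+: p.toList :=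
    List.prefix_of_prefix_length_le hh hp (by cases hl : p.toList with
      | nil => exact absurd hl hne
      | cons a l => simp)
  rw [Bool.eq_false_iff] at hph
  exact hph (by rw [PySem.Str.startswith_eq, PySem.Chars.startswith_iff]; exact h3)

-- the '#' clause in A's import test is redundant
lemma pvAIsImport_eq (line : String) : pvAIsImport line = pvBIsImport line := by
  unfold pvAIsImport pvBIsImport pvNotImport
  rcases h1 : PySem.Str.startswith (PySem.Str.strip line) "import " with _ | _
  · rcases h2 : PySem.Str.startswith (PySem.Str.strip line) "from " with _ | _
    · simp
    · have hh := pvNoHash _ "from " h2 (by decide) (by decide)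
      simp_all
  · have hh := pvNoHash _ "import " h1 (by decide) (by decide)
    simp_all

-- A's left-to-right last-index fold equals find-on-reverse
lemma pvLast_eq (xs : List String) (acc : Int) :
    (PySem.List.enumerate xs).foldl
        (fun a il => if pvBIsImport il.2 then il.1 else a) acc
      = match xs.reverse.findIdx? pvBIsImport with
        | none => acc
        | some j => ((xs.length - 1 - j : Nat) : Int) := by
  induction xs using List.reverseRecOn generalizing acc with
  | nil => simp [PySem.List.enumerate_nil]
  | append_singleton ys y ih =>
    rw [PySem.List.enumerate_append, List.foldl_append, ih]
    simp only [PySem.List.enumerate_cons, PySem.List.enumerate_nil, List.reverse_append,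
      List.reverse_singleton, List.singleton_append, List.findIdx?_cons,
      List.foldl_cons, List.foldl_nil]
    by_cases hy : pvBIsImport y = true
    · simp [hy]
    · rw [Bool.not_eq_true] at hy
      simp only [hy, Bool.false_eq_true, if_false]
      cases hj : List.findIdx? pvBIsImport ys.reverse with
      | none => simp
      | some j =>
        simp only [Option.map_some]
        have : (ys ++ [y]).length - 1 - (j + 1) = ys.length - 1 - j := by
          simp; omega
        rw [this]

-- A's break-loop equals the first-match index
lemma pvFirst_eq (xs : List String) (k : Int) :
    pvAFirstCode k xs
      = match xs.findIdx? pvAIsCode with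
        | none => 0
        | some j => k + (j : Int) := by
  induction xs generalizing k with
  | nil => simp [pvAFirstCode, List.findIdx?_nil]
  | cons x xs ih =>
    rw [List.findIdx?_cons]
    unfold pvAFirstCode
    by_cases hx : pvAIsCode x = true
    · simp [hx]
    · rw [Bool.not_eq_true] at hx
      simp only [hx, Bool.false_eq_true, if_false, ih]
      cases hj : List.findIdx? pvAIsCode xs with
      | none => simp
      | some j => simp only [Option.map_some]; push_cast; ring

-- two consecutive inserts are one splice
lemma pvInsertInsert {α : Type} (l : List α) (i : Nat) (hi : i ≤ l.length) (a b : α) :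
    PySem.List.insert (PySem.List.insert l (i : Int) a) ((i : Int) + 1) b
      = l.take i ++ a :: b :: l.drop i := by
  have ht : (l.take i).length = i := by simp [List.length_take]; omega
  rw [PySem.List.insert_natCast l i a hi]
  have h1 : ((i : Int) + 1) = ((i + 1 : Nat) : Int) := by push_cast; ring
  rw [h1, PySem.List.insert_natCast _ (i + 1) b (by simp; omega)]
  rw [List.take_append, List.drop_append, ht]
  have h2 : i + 1 - i = 1 := by omega
  have e1 : List.take (i + 1) (List.take i l) = List.take i l :=
    List.take_of_length_le (by rw [ht]; omega)
  have e2 : List.drop (i + 1) (List.take i l) = [] :=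
    List.drop_of_length_le (by rw [ht]; omega)
  rw [h2, e1, e2]
  simp

-- ===== VERDICT (by name: the statement is the Claim_ definition above) =====
theorem add_import_if_needed_py_spec : Claim_equal_add_import_if_needed_py := by
  unfold Claim_equal_add_import_if_needed_py Spec_add_import_if_needed_py
  intro content _
  unfold add_import_if_needed_py add_import_if_needed_py_alt
  by_cases hg : (PySem.Str.isIn "from config.data_config import" content ||
      PySem.Str.isIn "get_data_path" content) = true
  · simp only [hg, if_true]
  · rw [Bool.not_eq_true] at hg
    simp only [hg, Bool.false_eq_true, if_false]
    set lines := (PySem.Str.split? content "\n").getD [] with hl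
    have hfun : (fun (a : Int) (il : Int × String) => if pvAIsImport il.2 then il.1 else a)
        = (fun a il => if pvBIsImport il.2 then il.1 else a) := by
      funext a il; rw [pvAIsImport_eq]
    have hni : pvNotImport = fun x => !pvBIsImport x := by
      funext x; simp [pvBIsImport]
    rw [hfun, pvLast_eq, pvPopLoop_eq]
    cases hj : lines.reverse.findIdx? pvBIsImport with
    | some j =>
      have hjlt : j < lines.length := by
        have := pvFindIdxLt _ _ _ hj; simpa using this
      obtain ⟨htw, hdw⟩ := pvFind_some pvBIsImport lines.reverse j hj
      rw [hni] at *
      simp only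
      rw [if_pos (Int.natCast_nonneg _)]
      rw [htw, hdw]
      have hdrop : lines.reverse.drop j ≠ [] := by
        intro hc
        have := congrArg List.length hc
        simp at this; omega
      rw [if_pos (by simpa using hdrop)]
      have hcast : ((lines.length - 1 - j : Nat) : Int) + 1 = ((lines.length - j : Nat) : Int) := by
        omega
      rw [hcast, PySem.List.insert_natCast _ _ _ (by omega)]
      congr 1
      simp [List.reverse_drop, List.reverse_take]
    | none =>
      have hdw := pvFind_none pvBIsImport lines.reverse hj
      rw [hni] at *
      simp only
      rw [if_neg (by norm_num)]
      rw [hdw]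
      simp only [List.reverse_nil, ne_eq, not_true_eq_false, if_false]
      rw [pvFirst_eq, pvTakeLoop_eq]
      have hnc : pvNotCode = fun x => !pvAIsCode x := by
        funext x; rw [pvNotCode_eq]
      rw [hnc]
      cases hi : lines.findIdx? pvAIsCode with
      | none =>
        have hdc := pvFind_none pvAIsCode lines hi
        simp only
        rw [hdc]
        simp only [not_true_eq_false, if_false]
        have h0 : ((0 : Nat) : Int) = (0 : Int) := rfl
        rw [← h0, pvInsertInsert lines 0 (by omega)]
        simp
      | some i =>
        have hilt : i < lines.length := pvFindIdxLt _ _ _ hi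
        obtain ⟨htc, hdc⟩ := pvFind_some pvAIsCode lines i hi
        simp only
        rw [htc, hdc]
        have hdrop : lines.drop i ≠ [] := by
          intro hc
          have := congrArg List.length hc
          simp at this; omega
        rw [if_pos hdrop]
        have : (0 : Int) + (i : Int) = ((i : Nat) : Int) := by ring
        rw [this, pvInsertInsert lines i (by omega)]
        simp
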